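-- pv_equiv track=rewrite | github.com/RichelieuGVG1/neuro_ovoshi | taxonomy/get_taxonomy.py | remove_trash_from_string
-- ===== SOURCE A (Python) =====
-- def remove_trash_from_string(string):
--     for i, char in enumerate(string[1:], start=1):
--         if char.isupper():
--             space_index = string.rfind(' ', 0, i)
--             if space_index != -1:
--                 return string[:space_index]
--             else:
--                 return string[:i]
--     return string
-- ===== SOURCE B (Python) =====
-- def remove_trash_from_string(string):
--     last_space = 0 if string[:1] == ' ' else -1
--     for i, char in enumerate(string[1:], start=1):
--         if char.isupper():
--             return string[:last_space] if last_space != -1 else string[:i]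
--         if char == ' ':
--             last_space = i
--     return string
-- ===== Notes on version B (the rewrite author's own statement) =====
-- stated objective: alternative
-- what changed: Single forward pass that maintains the last-seen-space index as running state, replacing A's backward rfind scan at the first uppercase character.
import Mathlib
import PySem

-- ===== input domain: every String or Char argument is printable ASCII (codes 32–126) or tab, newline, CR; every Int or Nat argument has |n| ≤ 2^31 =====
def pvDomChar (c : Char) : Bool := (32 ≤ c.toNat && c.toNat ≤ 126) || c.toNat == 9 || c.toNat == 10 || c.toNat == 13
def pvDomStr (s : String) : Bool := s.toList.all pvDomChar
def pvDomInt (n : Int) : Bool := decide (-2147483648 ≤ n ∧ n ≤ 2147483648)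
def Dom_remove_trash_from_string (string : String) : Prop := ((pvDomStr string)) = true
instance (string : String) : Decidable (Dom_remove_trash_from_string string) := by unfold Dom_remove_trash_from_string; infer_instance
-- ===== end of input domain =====

-- B replaces A's backward rfind scan with a single forward pass maintaining the last-seen-space index (alternative decomposition; return value only).

-- ===== PORT A =====
-- string.rfind(' ', 0, hi): backward scan from hi-1, exact for 0 ≤ hi ≤ len
def pyRfindSpace (l : List Char) : Nat → Int
  | 0 => -1
  | n+1 => if l.getD n '?' == ' ' then (n : Int) else pyRfindSpace l n

def remove_trash_from_string_loopA (full : List Char) : List Char → Nat → List Char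
  | [], _ => full
  | c :: rest, i =>
    if PySem.Chars.isupper c then
      let space_index := pyRfindSpace full i
      if space_index != -1 then full.take space_index.toNat else full.take i
    else remove_trash_from_string_loopA full rest (i + 1)

def remove_trash_from_string (string : String) : String :=
  String.ofList (remove_trash_from_string_loopA string.toList (string.toList.drop 1) 1)

-- ===== PORT B =====
def remove_trash_from_string_loopB (full : List Char) : List Char → Nat → Int → List Char
  | [], _, _ => full
  | c :: rest, i, last_space =>
    if PySem.Chars.isupper c then
      if last_space != -1 then full.take last_space.toNat else full.take i
    else
      remove_trash_from_string_loopB full rest (i + 1)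
        (if c == ' ' then (i : Int) else last_space)

def remove_trash_from_string_alt (string : String) : String :=
  String.ofList (remove_trash_from_string_loopB string.toList (string.toList.drop 1) 1
    (if string.toList.take 1 == [' '] then 0 else -1))

-- ===== PRECONDITION & SPEC =====
def Spec_remove_trash_from_string (string : String) (out : String) : Prop := out = remove_trash_from_string_alt string
instance (string : String) (out : String) : Decidable (Spec_remove_trash_from_string string out) := by unfold Spec_remove_trash_from_string; infer_instance

-- ===== CLAIM (what is proved, stated in full; the proofs are below) =====
def Claim_equal_remove_trash_from_string : Prop := ∀ (string : String), Dom_remove_trash_from_string string → Spec_remove_trash_from_string string (remove_trash_from_string string)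

-- ===== LEMMAS AND PROOFS =====

theorem loopA_eq_loopB (full : List Char) (s : List Char) (i : Nat)
    (hs : s = full.drop i) :
    remove_trash_from_string_loopA full s i
      = remove_trash_from_string_loopB full s i (pyRfindSpace full i) := by
  induction s generalizing i with
  | nil => simp [remove_trash_from_string_loopA, remove_trash_from_string_loopB]
  | cons c rest ih =>
    have hc : full[i]? = some c := by
      have h0 : (full.drop i)[0]? = full[i + 0]? := List.getElem?_drop
      rw [← hs] at h0
      simpa using h0.symm
    have hrest : rest = full.drop (i + 1) := by
      have h1 := congrArg List.tail hs
      simpa [List.tail_drop] using h1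
    simp only [remove_trash_from_string_loopA, remove_trash_from_string_loopB]
    split
    · rfl
    · rw [ih (i + 1) hrest]
      congr 1
      show pyRfindSpace full (i + 1) = _
      simp [pyRfindSpace, List.getD, hc]

theorem ports_agree (string : String) :
    remove_trash_from_string string = remove_trash_from_string_alt string := by
  unfold remove_trash_from_string remove_trash_from_string_alt
  rw [loopA_eq_loopB string.toList (string.toList.drop 1) 1 rfl]
  have hinit : pyRfindSpace string.toList 1
      = (if string.toList.take 1 == [' '] then (0 : Int) else -1) := by
    cases h : string.toList with
    | nil => simp [pyRfindSpace]
    | cons c rest =>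
      by_cases hc : c = ' ' <;> simp [pyRfindSpace, hc]
  rw [hinit]

-- ===== VERDICT (by name: the statement is the Claim_ definition above) =====
theorem remove_trash_from_string_spec : Claim_equal_remove_trash_from_string := by
  intro string _
  show _ = _
  exact ports_agree string
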